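-- pv_equiv track=rewrite | github.com/lishiyo/second-me-prototype | app/processors/l0/utils.py | decode_url_safe
-- ===== SOURCE A (Python) =====
-- def decode_url_safe(text: str) -> str:
--     """
--     Restore special characters in URLs.
--
--     Args:
--         text: Text to decode
--
--     Returns:
--         Decoded text
--     """
--     placeholders = {
--         "__COLON_SLASH_SLASH__": "://",
--         "__DOT__": ".",
--         "__SLASH__": "/",
--         "__QUESTION__": "?",
--         "__AMPERSAND__": "&",
--         "__EQUALS__": "=",
--         "__HASH__": "#",
--         "__PERCENT__": "%",
--         "__PLUS__": "+",
--     }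
--
--     result = text
--     for placeholder, char in placeholders.items():
--         result = result.replace(placeholder, char)
--
--     return result
-- ===== SOURCE B (Python) =====
-- def decode_url_safe(text: str) -> str:
--     """Restore URL special characters: keeps the text as alternating raw pieces and
--     already-decoded separators; each placeholder pass splits only the raw pieces and
--     never rescans decoded output; the result is assembled once at the end."""
--     table = [("COLON_SLASH_SLASH","://"),("DOT","."),("SLASH","/"),("QUESTION","?"),
--              ("AMPERSAND","&"),("EQUALS","="),("HASH","#"),("PERCENT","%"),("PLUS","+")]
--     pieces = [text]
--     seps = []
--     for name, ch in table:
--         ph = "__" + name + "__"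
--         np, ns = [], []
--         for i, piece in enumerate(pieces):
--             parts = piece.split(ph)
--             np += parts
--             ns += [ch] * (len(parts) - 1)
--             if i < len(seps):
--                 ns.append(seps[i])
--         pieces, seps = np, ns
--     out = pieces[0]
--     for i, sep in enumerate(seps):
--         out += sep + pieces[i + 1]
--     return out
-- ===== Notes on version B (the rewrite author's own statement) =====
-- stated objective: alternative
-- what changed: Replaced A's nine full-string replace passes by passes over a segment list of raw pieces and already-decoded separators: each placeholder pass splits only the raw pieces (never rescanning decoded output) and the result is assembled once at the end.
import Mathlib
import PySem

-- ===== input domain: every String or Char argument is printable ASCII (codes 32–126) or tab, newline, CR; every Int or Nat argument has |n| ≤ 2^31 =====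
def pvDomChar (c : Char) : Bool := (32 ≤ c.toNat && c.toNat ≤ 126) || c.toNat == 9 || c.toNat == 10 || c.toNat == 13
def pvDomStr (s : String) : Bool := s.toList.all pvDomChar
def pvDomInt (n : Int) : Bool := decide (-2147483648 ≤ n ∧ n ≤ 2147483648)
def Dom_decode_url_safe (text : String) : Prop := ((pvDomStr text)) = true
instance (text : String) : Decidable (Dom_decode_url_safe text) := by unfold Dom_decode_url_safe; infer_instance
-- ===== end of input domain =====

-- B replaces A's nine full-string replace passes by passes over a segment list (raw pieces and
-- already-decoded separators) that split only the raw pieces and never rescan decoded output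
-- (objective: alternative algorithm, same result).

-- ===== PORT A =====
-- A's placeholders dict (insertion order)
def pvPlaceholders : List (String × String) :=
  [("__COLON_SLASH_SLASH__", "://"), ("__DOT__", "."), ("__SLASH__", "/"),
   ("__QUESTION__", "?"), ("__AMPERSAND__", "&"), ("__EQUALS__", "="),
   ("__HASH__", "#"), ("__PERCENT__", "%"), ("__PLUS__", "+")]

def decode_url_safe (text : String) : String :=
  pvPlaceholders.foldl (fun result pc => PySem.Str.replace result pc.1 pc.2) text

-- ===== PORT B =====
-- Source B's table of bare names and their decoded characters ("__" is added per pass)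
def pvTable : List (String × String) :=
  [("COLON_SLASH_SLASH", "://"), ("DOT", "."), ("SLASH", "/"),
   ("QUESTION", "?"), ("AMPERSAND", "&"), ("EQUALS", "="),
   ("HASH", "#"), ("PERCENT", "%"), ("PLUS", "+")]

-- Source B's inner loop for one placeholder (p, r): split each raw piece on p, insert r separators
-- between the new parts, and keep the old separator (seps[i], when present) after each group
def pvPass (p r : List Char) : List (List Char) → List (List Char) → List (List Char) × List (List Char)
  | [], _ => ([], [])
  | piece :: ps, seps =>
    (PySem.Chars.splitOn piece p ++ (pvPass p r ps (seps.drop 1)).1,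
     (List.replicate ((PySem.Chars.splitOn piece p).length - 1) r ++ seps.take 1) ++
       (pvPass p r ps (seps.drop 1)).2)

-- Source B's outer loop: one pass per table entry, building the placeholder ph = "__"+name+"__"
def pvRun : List (String × String) → List (List Char) × List (List Char) → List (List Char) × List (List Char)
  | [], st => st
  | nc :: rest, st =>
    pvRun rest (pvPass ('_' :: '_' :: nc.1.toList ++ ['_', '_']) nc.2.toList st.1 st.2)

-- Source B's final assembly: out = pieces[0]; for each sep: out += sep + next piece
def pvJoin : List (List Char) → List (List Char) → List Char
  | [], _ => []
  | piece :: _, [] => piece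
  | piece :: ps, sep :: ss => piece ++ sep ++ pvJoin ps ss

def decode_url_safe_alt (text : String) : String :=
  let st := pvRun pvTable ([text.toList], [])
  String.ofList (pvJoin st.1 st.2)

-- ===== PRECONDITION & SPEC =====
def Spec_decode_url_safe (text : String) (out : String) : Prop := out = decode_url_safe_alt text
instance (text : String) (out : String) : Decidable (Spec_decode_url_safe text out) := by
  unfold Spec_decode_url_safe; infer_instance

-- ===== CLAIM (what is proved, stated in full; the proofs are below) =====
def Claim_equal_decode_url_safe : Prop :=
  ∀ (text : String), Dom_decode_url_safe text → Spec_decode_url_safe text (decode_url_safe text)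

-- ===== LEMMAS AND PROOFS =====

-- A's placeholder table on code points, and the wrapped token of a B-table entry
def pvToksA : List (List Char × List Char) :=
  pvPlaceholders.map (fun pr => (pr.1.toList, pr.2.toList))

def pvWrap (nc : String × String) : List Char × List Char :=
  ('_' :: '_' :: nc.1.toList ++ ['_', '_'], nc.2.toList)

-- token characters: underscore and upper-case letters; the replacements use neither
def TokChar (c : Char) : Bool := c == '_' || ('A' ≤ c && c ≤ 'Z')

-- A's single replace pass (replace all occurrences of p by r, leftmost, no rescan), direct form
def repl1 (p r : List Char) (s : List Char) : List Char :=
  if h : p ≠ [] ∧ p.isPrefixOf s = true then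
    r ++ repl1 p r (s.drop p.length)
  else
    match s with
    | [] => []
    | c :: t => c :: repl1 p r t
termination_by s.length
decreasing_by
  · have h1 : p.length ≤ s.length := (List.isPrefixOf_iff_prefix.mp h.2).length_le
    have h2 : 0 < p.length := List.length_pos_iff.mpr h.1
    simp only [List.length_drop]; omega
  · simp

def pvStep (acc : List Char) (x : List Char × List Char) : List Char := repl1 x.1 x.2 acc

def chainL (cs : List Char) : List Char := pvToksA.foldl pvStep cs

-- Python's str.split on a nonempty separator, direct form (a nonempty list of parts)
def split1 (p : List Char) (s : List Char) : List (List Char) :=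
  if h : p ≠ [] ∧ p.isPrefixOf s = true then
    [] :: split1 p (s.drop p.length)
  else
    match s with
    | [] => [[]]
    | c :: t =>
      match split1 p t with
      | [] => [[c]]
      | h :: hs => (c :: h) :: hs
termination_by s.length
decreasing_by
  · have h1 : p.length ≤ s.length := (List.isPrefixOf_iff_prefix.mp h.2).length_le
    have h2 : 0 < p.length := List.length_pos_iff.mpr h.1
    simp only [List.length_drop]; omega
  · simp

-- the decoded text of one raw piece: its parts joined with the replacement r
def joinParts (r : List Char) : List (List Char) → List Char
  | [] => []
  | h :: t => h ++ t.flatMap (fun part => r ++ part)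

lemma repl1_nil (p r : List Char) : repl1 p r [] = [] := by
  rw [repl1]
  have hcond : ¬ (p ≠ [] ∧ p.isPrefixOf ([] : List Char) = true) := by
    rintro ⟨h1, h2⟩
    exact h1 (List.prefix_nil.mp (List.isPrefixOf_iff_prefix.mp h2))
  rw [dif_neg hcond]

lemma repl1_pos (p r s : List Char) (hp : p ≠ []) (h : p <+: s) :
    repl1 p r s = r ++ repl1 p r (s.drop p.length) := by
  rw [repl1]
  simp [hp, List.isPrefixOf_iff_prefix.mpr h]

lemma repl1_cons_neg (p r : List Char) (c : Char) (t : List Char) (h : ¬ p <+: (c :: t)) :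
    repl1 p r (c :: t) = c :: repl1 p r t := by
  rw [repl1]
  have hcond : ¬ (p ≠ [] ∧ p.isPrefixOf (c :: t) = true) := by
    rintro ⟨-, h2⟩; exact h (List.isPrefixOf_iff_prefix.mp h2)
  rw [dif_neg hcond]

lemma go_eq (p r : List Char) (hp : p ≠ []) :
    ∀ (fuel : Nat) (l acc : List Char), l.length ≤ fuel →
      PySem.Chars.replace.go p r fuel l acc = acc.reverse ++ repl1 p r l := by
  intro fuel
  induction fuel with
  | zero =>
    intro l acc hl
    have hnil : l = [] := List.length_eq_zero_iff.mp (Nat.le_zero.mp hl)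
    subst hnil
    rw [PySem.Chars.replace.go, repl1_nil]
  | succ f ih =>
    intro l acc hl
    cases l with
    | nil =>
      simp [PySem.Chars.replace.go, repl1_nil]
    | cons c t =>
      rw [PySem.Chars.replace.go]
      by_cases hpre : p.isPrefixOf (c :: t) = true
      · have hp0 : 0 < p.length := List.length_pos_iff.mpr hp
        have hple : p.length ≤ (c :: t).length := (List.isPrefixOf_iff_prefix.mp hpre).length_le
        have hlen : (List.drop p.length (c :: t)).length ≤ f := by
          simp only [List.length_drop]
          simp only [List.length_cons] at hple hl ⊢
          omega
        rw [if_pos hpre, ih _ _ hlen,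
            repl1_pos p r (c :: t) hp (List.isPrefixOf_iff_prefix.mp hpre)]
        simp
      · have hlen : t.length ≤ f := by simp only [List.length_cons] at hl; omega
        rw [if_neg hpre, ih _ _ hlen,
            repl1_cons_neg p r c t (fun hpf => hpre (List.isPrefixOf_iff_prefix.mpr hpf))]
        simp

lemma replace_eq (p r s : List Char) (hp : p ≠ []) :
    PySem.Chars.replace s p r = repl1 p r s := by
  rw [PySem.Chars.replace]
  have : p.isEmpty = false := by
    cases p with
    | nil => exact absurd rfl hp
    | cons a l => rfl
  rw [this]
  simp only [Bool.false_eq_true, if_false]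
  rw [go_eq p r hp s.length s [] (Nat.le_refl _)]
  simp

lemma split1_nil (p : List Char) : split1 p [] = [[]] := by
  rw [split1]
  have hcond : ¬ (p ≠ [] ∧ p.isPrefixOf ([] : List Char) = true) := by
    rintro ⟨h1, h2⟩
    exact h1 (List.prefix_nil.mp (List.isPrefixOf_iff_prefix.mp h2))
  rw [dif_neg hcond]

lemma split1_pos (p s : List Char) (hp : p ≠ []) (h : p <+: s) :
    split1 p s = [] :: split1 p (s.drop p.length) := by
  rw [split1]
  simp [hp, List.isPrefixOf_iff_prefix.mpr h]

lemma split1_cons_neg (p : List Char) (c : Char) (t : List Char) (h : ¬ p <+: (c :: t)) :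
    split1 p (c :: t) = match split1 p t with
      | [] => [[c]]
      | h :: hs => (c :: h) :: hs := by
  rw [split1]
  have hcond : ¬ (p ≠ [] ∧ p.isPrefixOf (c :: t) = true) := by
    rintro ⟨-, h2⟩; exact h (List.isPrefixOf_iff_prefix.mp h2)
  rw [dif_neg hcond]

lemma split1_ne (p s : List Char) : split1 p s ≠ [] := by
  rw [split1]
  split_ifs
  · simp
  · cases s with
    | nil => simp
    | cons c t =>
      simp only
      cases split1 p t <;> simp

lemma goS_eq (p : List Char) (hp : p ≠ []) :
    ∀ (fuel : Nat) (l cur : List Char) (acc : List (List Char)), l.length + 1 ≤ fuel →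
      PySem.Chars.splitOn.go p fuel l cur acc =
        acc.reverse ++ (match split1 p l with
          | [] => [cur.reverse]
          | h :: hs => (cur.reverse ++ h) :: hs) := by
  intro fuel
  induction fuel with
  | zero => intro l cur acc hl; omega
  | succ f ih =>
    intro l cur acc hl
    cases l with
    | nil =>
      rw [split1_nil p]
      rw [PySem.Chars.splitOn.go]
      · simp
      · omega
    | cons c t =>
      rw [PySem.Chars.splitOn.go]
      by_cases hpre : p.isPrefixOf (c :: t) = true
      · have hp0 : 0 < p.length := List.length_pos_iff.mpr hp
        have hple : p.length ≤ (c :: t).length := (List.isPrefixOf_iff_prefix.mp hpre).length_le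
        have hlen : (List.drop p.length (c :: t)).length + 1 ≤ f := by
          simp only [List.length_drop]
          simp only [List.length_cons] at hple hl ⊢
          omega
        rw [if_pos hpre, ih _ _ _ hlen,
            split1_pos p (c :: t) hp (List.isPrefixOf_iff_prefix.mp hpre)]
        obtain ⟨h, hs, hsp⟩ : ∃ h hs, split1 p (List.drop p.length (c :: t)) = h :: hs := by
          cases hx : split1 p (List.drop p.length (c :: t)) with
          | nil => exact absurd hx (split1_ne p _)
          | cons h hs => exact ⟨h, hs, rfl⟩
        rw [hsp]
        simp
      · have hlen : t.length + 1 ≤ f := by simp only [List.length_cons] at hl; omega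
        have hpre' : ¬ p <+: (c :: t) := fun hpf => hpre (List.isPrefixOf_iff_prefix.mpr hpf)
        rw [if_neg hpre, ih _ _ _ hlen, split1_cons_neg p c t hpre']
        cases hx : split1 p t with
        | nil => exact absurd hx (split1_ne p _)
        | cons h hs => simp

lemma splitOn_eq (p s : List Char) (hp : p ≠ []) :
    PySem.Chars.splitOn s p = split1 p s := by
  rw [PySem.Chars.splitOn, goS_eq p hp (s.length + 1) s [] [] (Nat.le_refl _)]
  cases hx : split1 p s with
  | nil => exact absurd hx (split1_ne p _)
  | cons h hs => simp

-- the decoded pieces of one raw piece joined with r equal A's replace pass on that piece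
lemma join_split (p r : List Char) (hp : p ≠ []) :
    ∀ (n : Nat) (s : List Char), s.length ≤ n →
      joinParts r (split1 p s) = repl1 p r s := by
  intro n
  induction n with
  | zero =>
    intro s hs
    have hnil : s = [] := List.length_eq_zero_iff.mp (Nat.le_zero.mp hs)
    subst hnil
    rw [split1_nil p, repl1_nil]
    simp [joinParts]
  | succ n ih =>
    intro s hs
    by_cases hpre : p <+: s
    · have hsne : s ≠ [] := by
        intro h; subst h
        exact hp (List.prefix_nil.mp hpre)
      have hp0 : 0 < p.length := List.length_pos_iff.mpr hp
      have hs0 : 0 < s.length := List.length_pos_iff.mpr hsne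
      have hlen : (s.drop p.length).length ≤ n := by
        simp only [List.length_drop]; omega
      rw [split1_pos p s hp hpre, repl1_pos p r s hp hpre, ← ih _ hlen]
      obtain ⟨h, hs', hsp⟩ : ∃ h hs', split1 p (s.drop p.length) = h :: hs' := by
        cases hx : split1 p (s.drop p.length) with
        | nil => exact absurd hx (split1_ne p _)
        | cons h hs' => exact ⟨h, hs', rfl⟩
      rw [hsp]
      simp [joinParts, List.append_assoc]
    · cases s with
      | nil =>
        rw [split1_nil p, repl1_nil]
        simp [joinParts]
      | cons c t =>
        have hlen : t.length ≤ n := by simp only [List.length_cons] at hs; omega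
        rw [split1_cons_neg p c t hpre, repl1_cons_neg p r c t hpre, ← ih _ hlen]
        cases hx : split1 p t with
        | nil => exact absurd hx (split1_ne p _)
        | cons h hs' => simp [joinParts]

-- a replace pass for a '_'-headed token walks unchanged through benign characters
lemma pvWalkB (p r : List Char) (hh : p.take 1 = ['_']) : ∀ (w rest : List Char),
    w.all (fun c => !TokChar c) = true →
    repl1 p r (w ++ rest) = w ++ repl1 p r rest := by
  intro w
  induction w with
  | nil => intro rest _; simp
  | cons c w ih =>
    intro rest hw
    have hc : TokChar c = false := by
      have := List.all_eq_true.mp hw c List.mem_cons_self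
      simpa using this
    have h0 : ¬ p <+: (c :: (w ++ rest)) := by
      intro hpre
      have hpeq : p = '_' :: p.drop 1 := by
        conv_lhs => rw [← List.take_append_drop 1 p]
        rw [hh]; rfl
      rw [hpeq] at hpre
      have : '_' = c := (List.cons_prefix_cons.mp hpre).1
      rw [← this] at hc
      simp [TokChar] at hc
    have hwall : w.all (fun c => !TokChar c) = true := by
      simp only [List.all_cons, Bool.and_eq_true] at hw
      exact hw.2
    rw [List.cons_append, repl1_cons_neg p r c (w ++ rest) h0, ih rest hwall, List.cons_append]

-- a replace pass for a clean token distributes over an append whose right part starts benign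
lemma pvBoundary (p r : List Char) (hp : p ≠ []) (hpc : p.all TokChar = true)
    (z : List Char) (hz : z = [] ∨ ∃ d zs, z = d :: zs ∧ TokChar d = false) :
    ∀ (n : Nat) (x : List Char), x.length ≤ n →
      repl1 p r (x ++ z) = repl1 p r x ++ repl1 p r z := by
  intro n
  induction n with
  | zero =>
    intro x hx
    have hnil : x = [] := List.length_eq_zero_iff.mp (Nat.le_zero.mp hx)
    subst hnil
    simp [repl1_nil]
  | succ n ih =>
    intro x hx
    cases x with
    | nil => simp [repl1_nil]
    | cons c t =>
      by_cases hpre : p <+: (c :: t)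
      · have hp0 : 0 < p.length := List.length_pos_iff.mpr hp
        have hple : p.length ≤ (c :: t).length := hpre.length_le
        have hcomb : p <+: ((c :: t) ++ z) := hpre.trans (List.prefix_append _ _)
        have hdrop : List.drop p.length ((c :: t) ++ z) = List.drop p.length (c :: t) ++ z :=
          List.drop_append_of_le_length hple
        have hlen : (List.drop p.length (c :: t)).length ≤ n := by
          simp only [List.length_drop]
          simp only [List.length_cons] at hx hple ⊢
          omega
        rw [repl1_pos p r _ hp hcomb, repl1_pos p r _ hp hpre, hdrop, ih _ hlen,
            List.append_assoc]
      · have hcomb : ¬ p <+: ((c :: t) ++ z) := by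
          intro hcp
          rcases List.prefix_or_prefix_of_prefix hcp (List.prefix_append (c :: t) z) with h | h
          · exact hpre h
          · obtain ⟨q, hq⟩ := h
            have hqz : q <+: z := by
              rw [← hq] at hcp
              exact (List.prefix_append_right_inj (c :: t)).mp hcp
            cases hq' : q with
            | nil =>
              rw [hq', List.append_nil] at hq
              exact hpre (hq ▸ List.prefix_refl _)
            | cons e es =>
              have he : TokChar e = true := by
                have hmem : e ∈ p := by
                  rw [← hq, hq']
                  exact List.mem_append_right _ List.mem_cons_self
                exact List.all_eq_true.mp hpc e hmem
              rcases hz with hz0 | ⟨d, zs, hzd, hd⟩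
              · rw [hz0, hq'] at hqz
                simpa using List.prefix_nil.mp hqz
              · rw [hzd, hq'] at hqz
                have : e = d := (List.cons_prefix_cons.mp hqz).1
                rw [this, hd] at he
                exact absurd he (by simp)
        have hlen : t.length ≤ n := by simp only [List.length_cons] at hx; omega
        rw [List.cons_append, repl1_cons_neg p r c (t ++ z) (by rw [← List.cons_append]; exact hcomb),
            repl1_cons_neg p r c t hpre, ih _ hlen, List.cons_append]

-- decidable structural facts about B's table: the wrapped tokens are exactly A's table,
-- and each token/replacement is clean/benign
lemma F_map : pvTable.map pvWrap = pvToksA := by decide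

lemma F_tok : ∀ x ∈ pvTable, (pvWrap x).1 ≠ [] ∧ (pvWrap x).1.all TokChar = true ∧
    (pvWrap x).1.take 1 = ['_'] := by decide

lemma F_rep : ∀ x ∈ pvTable, (pvWrap x).2 ≠ [] ∧
    (pvWrap x).2.all (fun c => !TokChar c) = true := by decide

lemma joinParts_cons₂ (r x y : List Char) (t : List (List Char)) :
    joinParts r (x :: y :: t) = x ++ r ++ joinParts r (y :: t) := by
  simp [joinParts, List.append_assoc]

lemma pvJoin_rep (r : List Char) : ∀ (parts : List (List Char)), parts ≠ [] →
    ∀ (np ns : List (List Char)) (sep : List Char),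
      pvJoin (parts ++ np) (List.replicate (parts.length - 1) r ++ sep :: ns) =
        joinParts r parts ++ sep ++ pvJoin np ns := by
  intro parts
  induction parts with
  | nil => intro h; exact absurd rfl h
  | cons x parts ih =>
    intro _ np ns sep
    cases parts with
    | nil => simp [pvJoin, joinParts]
    | cons y t =>
      have hlen : (x :: y :: t).length - 1 = t.length + 1 := by simp
      rw [hlen, List.replicate_succ]
      have h2 : List.replicate t.length r = List.replicate ((y :: t).length - 1) r := by simp
      simp only [List.cons_append, pvJoin]
      rw [joinParts_cons₂, h2]
      have hih := ih (by simp) np ns sep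
      rw [List.cons_append] at hih
      rw [hih]
      simp [List.append_assoc]

lemma pvJoin_rep0 (r : List Char) : ∀ (parts : List (List Char)), parts ≠ [] →
    pvJoin parts (List.replicate (parts.length - 1) r) = joinParts r parts := by
  intro parts
  induction parts with
  | nil => intro h; exact absurd rfl h
  | cons x parts ih =>
    intro _
    cases parts with
    | nil => simp [pvJoin, joinParts]
    | cons y t =>
      have hlen : (x :: y :: t).length - 1 = t.length + 1 := by simp
      rw [hlen, List.replicate_succ]
      have h2 : List.replicate t.length r = List.replicate ((y :: t).length - 1) r := by simp
      simp only [pvJoin]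
      rw [joinParts_cons₂, h2, ih (by simp)]

-- one pass of Source B equals one replace pass of A on the assembled text
lemma pvPass_join (p r : List Char) (hp : p ≠ []) (hpc : p.all TokChar = true)
    (hp1 : p.take 1 = ['_']) :
    ∀ (pieces seps : List (List Char)), pieces.length = seps.length + 1 →
      (∀ s ∈ seps, s ≠ [] ∧ s.all (fun c => !TokChar c) = true) →
      pvJoin (pvPass p r pieces seps).1 (pvPass p r pieces seps).2 =
        repl1 p r (pvJoin pieces seps) := by
  intro pieces
  induction pieces with
  | nil => intro seps h _; simp at h
  | cons piece ps ih =>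
    intro seps hlen hsep
    cases seps with
    | nil =>
      have hps : ps = [] := by
        have := hlen; simp only [List.length_cons, List.length_nil] at this
        exact List.length_eq_zero_iff.mp (by omega)
      subst hps
      simp only [pvPass, List.take_nil, List.append_nil]
      rw [splitOn_eq p piece hp, pvJoin_rep0 r _ (split1_ne p piece),
          join_split p r hp piece.length piece (Nat.le_refl _)]
      rfl
    | cons sep ss =>
      have hlen' : ps.length = ss.length + 1 := by
        simp only [List.length_cons] at hlen; omega
      have hsep' : ∀ s ∈ ss, s ≠ [] ∧ s.all (fun c => !TokChar c) = true :=
        fun s hs => hsep s (List.mem_cons_of_mem _ hs)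
      obtain ⟨hsne, hsb⟩ := hsep sep List.mem_cons_self
      simp only [pvPass]
      rw [show (sep :: ss).drop 1 = ss from rfl, show (sep :: ss).take 1 = [sep] from rfl]
      rw [splitOn_eq p piece hp]
      rw [show (List.replicate ((split1 p piece).length - 1) r ++ [sep]) ++
            (pvPass p r ps ss).2 =
          List.replicate ((split1 p piece).length - 1) r ++
            sep :: (pvPass p r ps ss).2 from by simp]
      rw [pvJoin_rep r (split1 p piece) (split1_ne p piece) _ _ sep,
          join_split p r hp piece.length piece (Nat.le_refl _), ih ss hlen' hsep']
      have hz : sep ++ pvJoin ps ss = [] ∨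
          ∃ d zs, sep ++ pvJoin ps ss = d :: zs ∧ TokChar d = false := by
        cases hse : sep with
        | nil => exact absurd hse hsne
        | cons d ds =>
          refine Or.inr ⟨d, ds ++ pvJoin ps ss, by simp, ?_⟩
          have := List.all_eq_true.mp hsb d (by rw [hse]; exact List.mem_cons_self)
          simpa using this
      rw [show pvJoin (piece :: ps) (sep :: ss) = piece ++ (sep ++ pvJoin ps ss) from by
            simp [pvJoin, List.append_assoc]]
      rw [pvBoundary p r hp hpc (sep ++ pvJoin ps ss) hz piece.length piece (Nat.le_refl _)]
      rw [pvWalkB p r hp1 sep _ hsb]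
      simp [List.append_assoc]

-- a pass keeps one more piece than separators
lemma pvPass_len (p r : List Char) (hp : p ≠ []) :
    ∀ (pieces seps : List (List Char)), pieces.length = seps.length + 1 →
      (pvPass p r pieces seps).1.length = (pvPass p r pieces seps).2.length + 1 := by
  intro pieces
  induction pieces with
  | nil => intro seps h; simp at h
  | cons piece ps ih =>
    intro seps hlen
    have hn : 0 < (PySem.Chars.splitOn piece p).length := by
      rw [splitOn_eq p piece hp]
      exact List.length_pos_iff.mpr (split1_ne p piece)
    cases seps with
    | nil =>
      have hps : ps = [] := by
        have := hlen; simp only [List.length_cons, List.length_nil] at this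
        exact List.length_eq_zero_iff.mp (by omega)
      subst hps
      simp only [pvPass, List.take_nil, List.append_nil]
      simp only [List.length_replicate]
      omega
    | cons sep ss =>
      have hlen' : ps.length = ss.length + 1 := by
        simp only [List.length_cons] at hlen; omega
      have := ih ss hlen'
      simp only [pvPass]
      rw [show (sep :: ss).drop 1 = ss from rfl, show (sep :: ss).take 1 = [sep] from rfl]
      simp only [List.length_append, List.length_replicate, List.length_cons,
        List.length_nil] at this ⊢
      omega

-- a pass's separators stay nonempty and benign
lemma pvPass_seps (p r : List Char) (hr : r ≠ [] ∧ r.all (fun c => !TokChar c) = true) :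
    ∀ (pieces seps : List (List Char)),
      (∀ s ∈ seps, s ≠ [] ∧ s.all (fun c => !TokChar c) = true) →
      ∀ s ∈ (pvPass p r pieces seps).2, s ≠ [] ∧ s.all (fun c => !TokChar c) = true := by
  intro pieces
  induction pieces with
  | nil => intro seps _ s hs; simp [pvPass] at hs
  | cons piece ps ih =>
    intro seps hsep s hs
    simp only [pvPass, List.mem_append] at hs
    rcases hs with (hs | hs) | hs
    · rw [List.eq_of_mem_replicate hs]; exact hr
    · exact hsep s (List.mem_of_mem_take hs)
    · exact ih (seps.drop 1) (fun x hx => hsep x (List.mem_of_mem_drop hx)) s hs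

-- B's outer loop computes the fold of A's replace passes over the wrapped tokens
lemma pvFold : ∀ (ts : List (String × String)),
    (∀ x ∈ ts, (pvWrap x).1 ≠ [] ∧ (pvWrap x).1.all TokChar = true ∧
      (pvWrap x).1.take 1 = ['_']) →
    (∀ x ∈ ts, (pvWrap x).2 ≠ [] ∧ (pvWrap x).2.all (fun c => !TokChar c) = true) →
    ∀ (pieces seps : List (List Char)), pieces.length = seps.length + 1 →
      (∀ s ∈ seps, s ≠ [] ∧ s.all (fun c => !TokChar c) = true) →
      pvJoin (pvRun ts (pieces, seps)).1 (pvRun ts (pieces, seps)).2 =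
        (ts.map pvWrap).foldl pvStep (pvJoin pieces seps) := by
  intro ts
  induction ts with
  | nil => intro _ _ pieces seps _ _; rfl
  | cons x ts ih =>
    intro hts hrs pieces seps hlen hsep
    obtain ⟨hxne, hxc, hx1⟩ := hts x List.mem_cons_self
    obtain ⟨hrne, hrb⟩ := hrs x List.mem_cons_self
    have htok : '_' :: '_' :: x.1.toList ++ ['_', '_'] = (pvWrap x).1 := rfl
    have hrep : x.2.toList = (pvWrap x).2 := rfl
    rw [List.map_cons, List.foldl_cons, pvRun, htok, hrep]
    have hred : pvPass (pvWrap x).1 (pvWrap x).2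
          ((pieces, seps) : List (List Char) × List (List Char)).1 (pieces, seps).2 =
        ((pvPass (pvWrap x).1 (pvWrap x).2 pieces seps).1,
         (pvPass (pvWrap x).1 (pvWrap x).2 pieces seps).2) := rfl
    rw [hred,
        ih (fun y hy => hts y (List.mem_cons_of_mem _ hy))
           (fun y hy => hrs y (List.mem_cons_of_mem _ hy)) _ _
          (pvPass_len (pvWrap x).1 (pvWrap x).2 hxne pieces seps hlen)
          (pvPass_seps (pvWrap x).1 (pvWrap x).2 ⟨hrne, hrb⟩ pieces seps hsep),
        pvPass_join (pvWrap x).1 (pvWrap x).2 hxne hxc hx1 pieces seps hlen hsep]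
    rfl

-- port A computes the nine-pass chain on code points
set_option maxHeartbeats 1000000 in
lemma pvA_eq (text : String) : decode_url_safe text = String.ofList (chainL text.toList) := by
  simp only [decode_url_safe, chainL, pvToksA, pvPlaceholders, List.map_cons, List.map_nil,
    pvStep, List.foldl_cons, List.foldl_nil, PySem.Str.replace, String.toList_ofList]
  refine congrArg String.ofList ?_
  rw [replace_eq "__PLUS__".toList "+".toList _ (by decide),
      replace_eq "__PERCENT__".toList "%".toList _ (by decide),
      replace_eq "__HASH__".toList "#".toList _ (by decide),
      replace_eq "__EQUALS__".toList "=".toList _ (by decide),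
      replace_eq "__AMPERSAND__".toList "&".toList _ (by decide),
      replace_eq "__QUESTION__".toList "?".toList _ (by decide),
      replace_eq "__SLASH__".toList "/".toList _ (by decide),
      replace_eq "__DOT__".toList ".".toList _ (by decide),
      replace_eq "__COLON_SLASH_SLASH__".toList "://".toList _ (by decide)]

-- ===== VERDICT (by name: the statement is the Claim_ definition above) =====
theorem decode_url_safe_spec : Claim_equal_decode_url_safe := by
  unfold Claim_equal_decode_url_safe
  intro text _
  show decode_url_safe text = decode_url_safe_alt text
  rw [pvA_eq]
  show _ = String.ofList _
  refine congrArg String.ofList ?_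
  have h := pvFold pvTable F_tok F_rep [text.toList] [] (by simp) (by simp)
  rw [show pvJoin [text.toList] [] = text.toList from rfl, F_map] at h
  exact h.symm
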